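-- pv_equiv track=rewrite | github.com/senkevinli/comp-programming | cf/784-div4/c.py | alter_parity
-- ===== SOURCE A (Python) =====
-- def alter_parity(arr, b):
--
--     b = not b
--     for n in arr[1:]:
--         if n % 2 == 0 and not b:
--             return False
--
--         if n % 2 == 1 and b:
--             return False
--         b = not b
--     return True
-- ===== SOURCE B (Python) =====
-- def alter_parity(arr, b):
--     b = bool(b)
--     if len(arr) < 2:
--         return True
--     if (arr[1] % 2 == 1) != b:
--         return False
--     return all((x - y) % 2 != 0 for x, y in zip(arr[1:], arr[2:]))
-- ===== Notes on version B (the rewrite author's own statement) =====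
-- stated objective: alternative
-- what changed: Replaces the threaded flip-flag loop with an anchor check on arr[1]'s parity plus a pairwise adjacent-parity-differs scan over zipped tails.
import Mathlib
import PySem

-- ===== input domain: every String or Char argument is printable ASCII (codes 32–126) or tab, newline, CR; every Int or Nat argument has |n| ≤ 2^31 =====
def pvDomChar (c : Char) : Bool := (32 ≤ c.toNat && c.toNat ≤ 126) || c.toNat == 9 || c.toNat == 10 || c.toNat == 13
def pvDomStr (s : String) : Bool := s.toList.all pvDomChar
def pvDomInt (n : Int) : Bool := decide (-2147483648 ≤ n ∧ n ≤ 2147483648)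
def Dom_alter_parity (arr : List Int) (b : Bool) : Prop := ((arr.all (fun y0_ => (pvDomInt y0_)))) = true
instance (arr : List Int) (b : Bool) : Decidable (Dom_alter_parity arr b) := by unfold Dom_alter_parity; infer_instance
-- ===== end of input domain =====

-- ===== PORT A =====
-- B replaces A's threaded flip-flag loop by an anchor check on arr[1] plus a pairwise adjacent-parity scan (alternative decomposition, same cost).
def alterLoopA : Bool → List Int → Bool
  | _, [] => true
  | b, n :: rest =>
    if PySem.Int.mod n 2 == 0 && !b then false
    else if PySem.Int.mod n 2 == 1 && b then false
    else alterLoopA (!b) rest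

def alter_parity (arr : List Int) (b : Bool) : Bool :=
  alterLoopA (!b) (PySem.List.slice arr (some 1) none)

-- ===== PORT B =====
def alter_parity_alt (arr : List Int) (b : Bool) : Bool :=
  if arr.length < 2 then true
  else if ((PySem.Int.mod (PySem.List.pyGetD arr 1 0) 2 == 1) != b) then false
  else ((PySem.List.slice arr (some 1) none).zip (PySem.List.slice arr (some 2) none)).all
        (fun p => PySem.Int.mod (p.1 - p.2) 2 != 0)

-- ===== PRECONDITION & SPEC =====
def Spec_alter_parity (arr : List Int) (b : Bool) (out : Bool) : Prop := out = alter_parity_alt arr b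
instance (arr : List Int) (b : Bool) (out : Bool) : Decidable (Spec_alter_parity arr b out) := by unfold Spec_alter_parity; infer_instance

-- ===== CLAIM (what is proved, stated in full; the proofs are below) =====
def Claim_equal_alter_parity : Prop := ∀ (arr : List Int) (b : Bool), Dom_alter_parity arr b → Spec_alter_parity arr b (alter_parity arr b)

-- ===== LEMMAS AND PROOFS =====

-- A's loop over a tail l, with initial flag (!b), equals B's anchor-plus-pairwise check of l.
theorem alterLoopA_eq_anchor_pair (l : List Int) (b : Bool) :
    alterLoopA (!b) l =
      match l with
      | [] => true
      | x :: _ => (((PySem.Int.mod x 2 == 1) == b) &&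
          (l.zip l.tail).all (fun p => PySem.Int.mod (p.1 - p.2) 2 != 0)) := by
  induction l generalizing b with
  | nil => rfl
  | cons x rest ih =>
    have hx := PySem.Int.mod_eq_emod_of_pos (a := x) (b := 2) (by omega)
    simp only [alterLoopA, Bool.not_not]
    rcases rest with _ | ⟨y, r2⟩
    · simp only [alterLoopA, List.tail_cons, List.zip_nil_right, List.all_nil, hx]
      rcases Int.emod_two_eq x with h1 | h1 <;> rw [h1] <;> cases b <;> simp
    · have hIH := ih (b := !b)
      rw [Bool.not_not] at hIH
      rw [hIH]
      have hy := PySem.Int.mod_eq_emod_of_pos (a := y) (b := 2) (by omega)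
      have hd := PySem.Int.mod_eq_emod_of_pos (a := x - y) (b := 2) (by omega)
      simp only [List.tail_cons, List.zip_cons_cons, List.all_cons, hx, hy, hd]
      rcases Int.emod_two_eq x with h1 | h1 <;>
        rcases Int.emod_two_eq y with h2 | h2 <;>
        rcases Int.emod_two_eq (x - y) with h3 | h3 <;>
        first
          | (exfalso; omega)
          | (rw [h1, h2, h3]; cases b <;> simp)

-- ===== VERDICT (by name: the statement is the Claim_ definition above) =====
theorem alter_parity_spec : Claim_equal_alter_parity := by
  intro arr b _
  unfold Spec_alter_parity alter_parity alter_parity_alt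
  have hs1 : PySem.List.slice arr (some 1) none = arr.drop 1 := by
    simp [PySem.List.slice_from]
  have hs2 : PySem.List.slice arr (some 2) none = arr.drop 2 := by
    simp [PySem.List.slice_from]
  rw [hs1, hs2]
  rw [alterLoopA_eq_anchor_pair]
  rcases arr with _ | ⟨a0, _ | ⟨a1, rest⟩⟩
  · simp
  · simp
  · have h2 : ¬ ((a0 :: a1 :: rest).length < 2) := by simp
    simp only [h2, if_false]
    have hg : PySem.List.pyGetD (a0 :: a1 :: rest) 1 0 = a1 := by
      simp [PySem.List.pyGetD, PySem.List.pyGet?, PySem.List.pyIdx?]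
    rw [hg]
    simp only [List.drop_succ_cons, List.drop_zero, List.tail_cons]
    rw [PySem.Int.mod_eq_emod_of_pos (a := a1) (b := 2) (by omega)]
    cases hA : (a1 % 2 == 1) == b
    · simp [bne, hA]
    · simp [bne, hA]
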